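-- pv_equiv track=rewrite | github.com/mendymsuoi/MendyLang | mlang/mLang/TokensToPython.py | ConvertTokensToPython
-- ===== SOURCE A (Python) =====
-- builtIn={"print":"print"}
--
-- def ConvertTokensToPython(tokens):
-- 	out=""
-- 	inAnEasyString=False
-- 	for token in tokens:
-- 		if inAnEasyString:
-- 			out+=token
-- 		elif token in builtIn:
-- 			out+=builtIn[token]
-- 		elif token=="/":
-- 			out+="(\""
-- 			inAnEasyString=True
-- 	if inAnEasyString:
-- 		out+="\")"
-- 	return out
-- ===== SOURCE B (Python) =====
-- builtIn = {"print": "print"}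
--
-- def ConvertTokensToPython(tokens):
--     # Two-phase build: split at the FIRST "/" (if any), map the prefix through
--     # builtIn, and join the raw suffix, instead of A's stateful flag + "+=" loop.
--     if "/" in tokens:
--         i = tokens.index("/")
--         pre = "".join(builtIn[t] for t in tokens[:i] if t in builtIn)
--         return pre + '("' + "".join(tokens[i + 1:]) + '")'
--     return "".join(builtIn[t] for t in tokens if t in builtIn)
-- ===== Notes on version B (the rewrite author's own statement) =====
-- stated objective: idiomatic
-- what changed: Replaces the stateful inAnEasyString flag and += accumulation with a split at the first '/' token and two ''.join passes (builtIn-mapped prefix, raw suffix).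
import Mathlib
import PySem

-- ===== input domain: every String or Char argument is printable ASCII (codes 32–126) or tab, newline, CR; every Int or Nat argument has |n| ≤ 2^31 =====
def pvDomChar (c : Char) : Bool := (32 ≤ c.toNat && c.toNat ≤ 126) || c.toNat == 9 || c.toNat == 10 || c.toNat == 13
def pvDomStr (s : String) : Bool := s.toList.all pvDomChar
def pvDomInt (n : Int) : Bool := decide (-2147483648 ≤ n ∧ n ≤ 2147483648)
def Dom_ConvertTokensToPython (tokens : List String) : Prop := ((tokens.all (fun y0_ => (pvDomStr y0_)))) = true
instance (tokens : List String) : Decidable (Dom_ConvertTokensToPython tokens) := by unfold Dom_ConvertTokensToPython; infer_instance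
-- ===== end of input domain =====

-- B replaces A's stateful flag + "+=" loop by a split at the first "/" and two joins (idiomatic decomposition).


-- ===== PORT A =====
-- module constant builtIn = {"print": "print"} (shared by both Pythons)
def builtIn : PySem.Dict String String := PySem.Dict.ofList [("print", "print")]

-- one loop iteration of A: state (out, inAnEasyString)
def stepA (st : String × Bool) (token : String) : String × Bool :=
  if st.2 then (st.1 ++ token, st.2)
  else if PySem.Dict.contains builtIn token then (st.1 ++ PySem.Dict.getD builtIn token "", st.2)
  else if token = "/" then (st.1 ++ "(\"", true)
  else st

def ConvertTokensToPython (tokens : List String) : String :=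
  let st := tokens.foldl stepA ("", false)
  if st.2 then st.1 ++ "\")" else st.1

-- ===== PORT B =====
-- "".join(builtIn[t] for t in ts if t in builtIn)
def mappedJoin (ts : List String) : String :=
  PySem.Str.join "" (ts.filterMap (fun t => PySem.Dict.get? builtIn t))

-- tokens[:i] / tokens[i+1:] are List.take / List.drop (the index? result is a valid nonneg index)
def ConvertTokensToPython_alt (tokens : List String) : String :=
  match PySem.List.index? tokens "/" with
  | some i => mappedJoin (tokens.take i) ++ "(\"" ++ PySem.Str.join "" (tokens.drop (i + 1)) ++ "\")"
  | none => mappedJoin tokens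

-- ===== PRECONDITION & SPEC =====
def Spec_ConvertTokensToPython (tokens : List String) (out : String) : Prop := out = ConvertTokensToPython_alt tokens
instance (tokens : List String) (out : String) : Decidable (Spec_ConvertTokensToPython tokens out) := by unfold Spec_ConvertTokensToPython; infer_instance

-- ===== CLAIM (what is proved, stated in full; the proofs are below) =====
def Claim_equal_ConvertTokensToPython : Prop := ∀ (tokens : List String), Dom_ConvertTokensToPython tokens → Spec_ConvertTokensToPython tokens (ConvertTokensToPython tokens)

-- ===== LEMMAS AND PROOFS =====

theorem chars_join_empty (ls : List (List Char)) : PySem.Chars.join [] ls = ls.flatten := by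
  induction ls with
  | nil => simp [PySem.Chars.join_nil]
  | cons a ls ih =>
      cases ls with
      | nil => simp [PySem.Chars.join_singleton]
      | cons b r => rw [PySem.Chars.join_cons_cons, ih]; simp

theorem join_empty_nil : PySem.Str.join "" ([] : List String) = "" := by
  apply String.toList_inj.mp
  rw [PySem.Str.toList_join]
  simp

theorem join_empty_cons (x : String) (xs : List String) :
    PySem.Str.join "" (x :: xs) = x ++ PySem.Str.join "" xs := by
  apply String.toList_inj.mp
  simp only [PySem.Str.toList_join, String.toList_append, List.map_cons]
  simp [chars_join_empty]

theorem builtIn_get? (t : String) :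
    PySem.Dict.get? builtIn t = if t = "print" then some "print" else none := by
  have h : builtIn = PySem.Dict.mk [("print", "print")] := by decide
  rw [h, PySem.Dict.get?_mk_cons]
  by_cases ht : t = "print"
  · subst ht
    rw [if_pos rfl]
    simp only [beq_self_eq_true, if_true]
  · have hb : (("print" : String) == t) = false := beq_eq_false_iff_ne.mpr (Ne.symm ht)
    rw [if_neg ht, hb]
    simp [PySem.Dict.get?]

theorem builtIn_contains (t : String) :
    PySem.Dict.contains builtIn t = (t == "print") := by
  rw [PySem.Dict.contains_eq_isSome_get?, builtIn_get?]
  by_cases ht : t = "print" <;> simp [ht]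

theorem mappedJoin_nil : mappedJoin [] = "" := by
  simp [mappedJoin, join_empty_nil]

theorem mappedJoin_cons_print (ts : List String) :
    mappedJoin ("print" :: ts) = "print" ++ mappedJoin ts := by
  simp only [mappedJoin, List.filterMap_cons, builtIn_get?]
  exact join_empty_cons _ _

theorem mappedJoin_cons_other (t : String) (ht : t ≠ "print") (ts : List String) :
    mappedJoin (t :: ts) = mappedJoin ts := by
  simp [mappedJoin, builtIn_get?, ht]

theorem stepA_true (acc t : String) : stepA (acc, true) t = (acc ++ t, true) := by
  simp [stepA]

theorem stepA_print (acc : String) : stepA (acc, false) "print" = (acc ++ "print", false) := by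
  simp only [stepA]
  norm_num [builtIn_contains]
  decide

theorem stepA_slash (acc : String) : stepA (acc, false) "/" = (acc ++ "(\"", true) := by
  simp only [stepA]
  norm_num [builtIn_contains]
  decide

theorem stepA_other (acc t : String) (hp : t ≠ "print") (hs : t ≠ "/") :
    stepA (acc, false) t = (acc, false) := by
  simp [stepA, builtIn_contains, hp, hs]

-- unfolding lemmas for B's port on a cons
theorem alt_cons_print (ts : List String) :
    ConvertTokensToPython_alt ("print" :: ts) = "print" ++ ConvertTokensToPython_alt ts := by
  cases h : PySem.List.index? ts "/" with
  | none =>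
      simp only [ConvertTokensToPython_alt,
        PySem.List.index?_cons_of_ne ts (by decide : ("print" : String) ≠ "/"), h,
        Option.map_none, mappedJoin_cons_print]
  | some i =>
      simp only [ConvertTokensToPython_alt,
        PySem.List.index?_cons_of_ne ts (by decide : ("print" : String) ≠ "/"), h,
        Option.map_some, List.take_succ_cons, List.drop_succ_cons, mappedJoin_cons_print]
      simp [String.append_assoc]

theorem alt_cons_other (t : String) (hp : t ≠ "print") (hs : t ≠ "/") (ts : List String) :
    ConvertTokensToPython_alt (t :: ts) = ConvertTokensToPython_alt ts := by
  cases h : PySem.List.index? ts "/" with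
  | none =>
      simp only [ConvertTokensToPython_alt, PySem.List.index?_cons_of_ne ts hs, h,
        Option.map_none, mappedJoin_cons_other t hp]
  | some i =>
      simp only [ConvertTokensToPython_alt, PySem.List.index?_cons_of_ne ts hs, h,
        Option.map_some, List.take_succ_cons, List.drop_succ_cons, mappedJoin_cons_other t hp]

theorem alt_cons_slash (ts : List String) :
    ConvertTokensToPython_alt ("/" :: ts) = "(\"" ++ PySem.Str.join "" ts ++ "\")" := by
  simp only [ConvertTokensToPython_alt, PySem.List.index?_cons_self, List.take_zero,
    List.drop_succ_cons, List.drop_zero, mappedJoin_nil]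
  simp [String.append_assoc]

-- the flag-true phase of A's loop appends every remaining token raw
theorem foldl_stepA_true (ts : List String) (acc : String) :
    ts.foldl stepA (acc, true) = (acc ++ PySem.Str.join "" ts, true) := by
  induction ts generalizing acc with
  | nil => simp [join_empty_nil]
  | cons t ts ih =>
      rw [List.foldl_cons, stepA_true, ih, join_empty_cons, String.append_assoc]

-- the main invariant: from a flag-false state, A's finished output is acc ++ B's output
theorem foldl_stepA_false (ts : List String) (acc : String) :
    (let st := ts.foldl stepA (acc, false); if st.2 then st.1 ++ "\")" else st.1)
      = acc ++ ConvertTokensToPython_alt ts := by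
  induction ts generalizing acc with
  | nil => simp [ConvertTokensToPython_alt, mappedJoin_nil]
  | cons t ts ih =>
      by_cases hp : t = "print"
      · subst hp
        rw [List.foldl_cons, stepA_print, ih, alt_cons_print, String.append_assoc]
      · by_cases hs : t = "/"
        · subst hs
          rw [List.foldl_cons, stepA_slash, foldl_stepA_true]
          simp only [if_pos]
          rw [alt_cons_slash]
          simp [String.append_assoc]
        · rw [List.foldl_cons, stepA_other acc t hp hs, ih, alt_cons_other t hp hs]

-- ===== VERDICT (by name: the statement is the Claim_ definition above) =====
theorem ConvertTokensToPython_spec : Claim_equal_ConvertTokensToPython := by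
  intro tokens _
  unfold Spec_ConvertTokensToPython ConvertTokensToPython
  have h := foldl_stepA_false tokens ""
  simpa using h
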